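-- pv_equiv track=rewrite | github.com/md-k-sarker/XAI | Image_Classification/data_io.py | zero_one_class_counter
-- ===== SOURCE A (Python) =====
-- def zero_one_class_counter(dataList):
--     classZero = 0
--     classOne = 0
--     for i in dataList:
--         if(i == 0):
--             classZero += 1
--         elif(i == 1):
--             classOne += 1
--     return classZero, classOne
-- ===== SOURCE B (Python) =====
-- def zero_one_class_counter(dataList):
--     return dataList.count(0), dataList.count(1)
-- ===== Notes on version B (the rewrite author's own statement) =====
-- stated objective: idiomatic
-- what changed: Replaces the single manual pass with two scalar accumulators and if/elif branching by two independent list.count passes, one per class, with no explicit loop or branching.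
import Mathlib
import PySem

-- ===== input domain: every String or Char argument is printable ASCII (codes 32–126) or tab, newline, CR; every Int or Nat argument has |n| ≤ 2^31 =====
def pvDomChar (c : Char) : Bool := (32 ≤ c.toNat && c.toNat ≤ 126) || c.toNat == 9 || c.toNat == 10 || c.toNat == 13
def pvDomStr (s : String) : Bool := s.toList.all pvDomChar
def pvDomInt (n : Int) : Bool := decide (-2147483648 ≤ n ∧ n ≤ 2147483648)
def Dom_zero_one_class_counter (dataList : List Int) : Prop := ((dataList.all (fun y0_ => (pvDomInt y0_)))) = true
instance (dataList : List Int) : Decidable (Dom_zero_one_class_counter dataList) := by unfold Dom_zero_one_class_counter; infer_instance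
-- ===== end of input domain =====

-- B replaces A's single manual pass with accumulators and if/elif by two independent list.count passes, one per class (idiomatic).

-- ===== PORT A =====
def zero_one_class_counter (dataList : List Int) : Int × Int :=
  let st := dataList.foldl
    (fun (p : Int × Int) i =>
      if i == 0 then (p.1 + 1, p.2)
      else if i == 1 then (p.1, p.2 + 1)
      else p)
    (0, 0)
  st

-- ===== PORT B =====
def zero_one_class_counter_alt (dataList : List Int) : Int × Int :=
  (PySem.List.count dataList 0, PySem.List.count dataList 1)

-- ===== PRECONDITION & SPEC =====
def Spec_zero_one_class_counter (dataList : List Int) (out : Int × Int) : Prop := out = zero_one_class_counter_alt dataList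
instance (dataList : List Int) (out : Int × Int) : Decidable (Spec_zero_one_class_counter dataList out) := by unfold Spec_zero_one_class_counter; infer_instance

-- ===== CLAIM =====
def Claim_equal_zero_one_class_counter : Prop := ∀ (dataList : List Int), Dom_zero_one_class_counter dataList → Spec_zero_one_class_counter dataList (zero_one_class_counter dataList)

-- ===== LEMMAS AND PROOFS =====
-- A's fold equals (count 0, count 1), by foldl-with-accumulator induction.
theorem pvFoldA_eq_counts (l : List Int) (a b : Int) :
    l.foldl
      (fun (p : Int × Int) i =>
        if i == 0 then (p.1 + 1, p.2)
        else if i == 1 then (p.1, p.2 + 1)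
        else p)
      (a, b) = (a + l.count 0, b + l.count 1) := by
  induction l generalizing a b with
  | nil => simp
  | cons x xs ih =>
    simp only [List.foldl_cons]
    split_ifs with h0 h1 <;> rw [ih] <;>
      simp only [beq_iff_eq] at * <;>
      simp_all [List.count_cons, Prod.ext_iff] <;> push_cast <;> omega

-- ===== VERDICT =====
theorem zero_one_class_counter_spec : Claim_equal_zero_one_class_counter := by
  intro l _
  unfold Spec_zero_one_class_counter zero_one_class_counter zero_one_class_counter_alt
  rw [pvFoldA_eq_counts]
  simp [PySem.List.count_eq]
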